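-- pv_equiv track=rewrite | github.com/subhatta123/bitool | django_dbchat/fix_semantic_duckdb_correct_path.py | _infer_semantic_type
-- ===== SOURCE A (Python) =====
-- def _infer_semantic_type(col_name: str, col_data) -> str:
--     """Infer semantic type from column name and data"""
--     col_name_lower = col_name.lower()
--
--     # Identifier patterns
--     if any(pattern in col_name_lower for pattern in ['id', 'key', 'number', 'code']):
--         return 'identifier'
--
--     # Date patterns
--     if any(pattern in col_name_lower for pattern in ['date', 'time', 'created', 'updated']):
--         return 'date'
--
--     # Measure patterns (numeric business metrics)
--     if any(pattern in col_name_lower for pattern in ['sales', 'revenue', 'profit', 'amount', 'price', 'cost', 'quantity', 'count']):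
--         return 'measure'
--
--     # Default to dimension
--     return 'dimension'
-- ===== SOURCE B (Python) =====
-- _KEYWORDS = [('id', 0), ('key', 0), ('number', 0), ('code', 0),
--              ('date', 1), ('time', 1), ('created', 1), ('updated', 1),
--              ('sales', 2), ('revenue', 2), ('profit', 2), ('amount', 2),
--              ('price', 2), ('cost', 2), ('quantity', 2), ('count', 2)]
-- _LABELS = ['identifier', 'date', 'measure', 'dimension']
--
-- def _infer_semantic_type(col_name: str, col_data) -> str:
--     # Single character-position scan: at each position of the lowercased name,
--     # test which keywords start there and keep the best (lowest) priority rank.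
--     name = col_name.lower()
--     best = 3
--     for i in range(len(name)):
--         for kw, rank in _KEYWORDS:
--             if rank < best and name.startswith(kw, i):
--                 best = rank
--     return _LABELS[best]
-- ===== Notes on version B (the rewrite author's own statement) =====
-- stated objective: alternative
-- what changed: Instead of per-group substring searches over the whole name, B does one position-major scan of the lowercased name, testing keyword prefixes at each position and maintaining a minimum-priority-rank accumulator, then maps the rank to its label.
import Mathlib
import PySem

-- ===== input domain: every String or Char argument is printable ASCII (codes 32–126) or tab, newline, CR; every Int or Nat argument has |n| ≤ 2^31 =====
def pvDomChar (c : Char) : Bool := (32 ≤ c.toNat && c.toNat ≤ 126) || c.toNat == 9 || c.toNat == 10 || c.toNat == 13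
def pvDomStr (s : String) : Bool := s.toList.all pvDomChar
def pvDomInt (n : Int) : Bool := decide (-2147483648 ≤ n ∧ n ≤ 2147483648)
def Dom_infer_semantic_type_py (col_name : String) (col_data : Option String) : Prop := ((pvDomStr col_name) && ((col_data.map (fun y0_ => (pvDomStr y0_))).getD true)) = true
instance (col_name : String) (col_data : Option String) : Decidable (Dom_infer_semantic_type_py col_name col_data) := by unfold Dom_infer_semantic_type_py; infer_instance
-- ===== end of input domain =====

-- B replaces A's per-group substring searches by one position-major scan of the
-- lowercased name keeping a minimum-priority-rank accumulator (objective: alternative).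

-- ===== PORT A =====
def infer_semantic_type_py (col_name : String) (col_data : Option String) : String :=
  let col_name_lower := PySem.Str.lower col_name
  if ["id", "key", "number", "code"].any (fun pattern => PySem.Str.isIn pattern col_name_lower) then
    "identifier"
  else if ["date", "time", "created", "updated"].any (fun pattern => PySem.Str.isIn pattern col_name_lower) then
    "date"
  else if ["sales", "revenue", "profit", "amount", "price", "cost", "quantity", "count"].any
      (fun pattern => PySem.Str.isIn pattern col_name_lower) then
    "measure"
  else
    "dimension"

-- ===== PORT B =====
def pvKeywords : List (List Char × Nat) :=
  [("id".toList, 0), ("key".toList, 0), ("number".toList, 0), ("code".toList, 0),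
   ("date".toList, 1), ("time".toList, 1), ("created".toList, 1), ("updated".toList, 1),
   ("sales".toList, 2), ("revenue".toList, 2), ("profit".toList, 2), ("amount".toList, 2),
   ("price".toList, 2), ("cost".toList, 2), ("quantity".toList, 2), ("count".toList, 2)]

def pvLabels : List String := ["identifier", "date", "measure", "dimension"]

-- inner loop: for kw, rank in _KEYWORDS: if rank < best and name.startswith(kw, i): best = rank
def pvStep (s : List Char) (b : Nat) (kr : List Char × Nat) : Nat :=
  if kr.2 < b ∧ kr.1.isPrefixOf s then kr.2 else b

-- outer loop: for i in range(len(name)): visit the suffix starting at i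
def pvScan : List Char → Nat → Nat
  | [], best => best
  | c :: t, best => pvScan t (pvKeywords.foldl (pvStep (c :: t)) best)

def infer_semantic_type_py_alt (col_name : String) (col_data : Option String) : String :=
  let best := pvScan (PySem.Str.lower col_name).toList 3
  pvLabels.getD best "dimension"

-- ===== PRECONDITION & SPEC =====
def Spec_infer_semantic_type_py (col_name : String) (col_data : Option String) (out : String) : Prop := out = infer_semantic_type_py_alt col_name col_data
instance (col_name : String) (col_data : Option String) (out : String) : Decidable (Spec_infer_semantic_type_py col_name col_data out) := by unfold Spec_infer_semantic_type_py; infer_instance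

-- ===== CLAIM =====
def Claim_equal_infer_semantic_type_py : Prop := ∀ (col_name : String) (col_data : Option String), Dom_infer_semantic_type_py col_name col_data → Spec_infer_semantic_type_py col_name col_data (infer_semantic_type_py col_name col_data)

-- ===== LEMMAS AND PROOFS =====

-- keyword groups (as char lists) and their "some keyword occurs / starts here" tests
def pvG0 : List (List Char) := ["id".toList, "key".toList, "number".toList, "code".toList]
def pvG1 : List (List Char) := ["date".toList, "time".toList, "created".toList, "updated".toList]
def pvG2 : List (List Char) :=
  ["sales".toList, "revenue".toList, "profit".toList, "amount".toList,
   "price".toList, "cost".toList, "quantity".toList, "count".toList]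

def pvIn (g : List (List Char)) (s : List Char) : Bool := g.any (fun kw => PySem.Chars.isIn kw s)
def pvPref (g : List (List Char)) (s : List Char) : Bool := g.any (fun kw => kw.isPrefixOf s)

-- rank of the first group containing an occurring keyword (3 = none)
def pvRk (s : List Char) : Nat :=
  if pvIn pvG0 s then 0 else if pvIn pvG1 s then 1 else if pvIn pvG2 s then 2 else 3

lemma pvStep_eq (s : List Char) (b : Nat) (kr : List Char × Nat) :
    pvStep s b kr = if kr.1.isPrefixOf s then min b kr.2 else b := by
  unfold pvStep
  by_cases hp : kr.1.isPrefixOf s <;> by_cases hr : kr.2 < b <;> simp [hp, hr] <;> omega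

lemma pvFoldl_group (g : List (List Char)) (r : Nat) (s : List Char) :
    ∀ b, List.foldl (pvStep s) b (g.map (fun kw => (kw, r)))
      = if pvPref g s then min b r else b := by
  induction g with
  | nil => intro b; simp [pvPref]
  | cons kw g ih =>
      intro b
      simp only [List.map_cons, List.foldl_cons, pvStep_eq, ih]
      by_cases hp : kw.isPrefixOf s
      · simp only [pvPref, List.any_cons, hp, Bool.true_or, if_true]
        split <;> omega
      · simp [pvPref, List.any_cons, hp]

lemma pvKeywords_split :
    pvKeywords = pvG0.map (fun kw => (kw, 0)) ++ pvG1.map (fun kw => (kw, 1))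
      ++ pvG2.map (fun kw => (kw, 2)) := by rfl

-- the inner loop computes min b (rank of the best group with a keyword starting at s)
lemma pvFoldl_keywords (s : List Char) (b : Nat) (hb : b ≤ 3) :
    pvKeywords.foldl (pvStep s) b
      = min b (if pvPref pvG0 s then 0 else if pvPref pvG1 s then 1
               else if pvPref pvG2 s then 2 else 3) := by
  rw [pvKeywords_split]
  rw [List.foldl_append, List.foldl_append, pvFoldl_group, pvFoldl_group, pvFoldl_group]
  split_ifs <;> omega

lemma pvIn_cons (g : List (List Char)) (c : Char) (t : List Char) :
    pvIn g (c :: t) = (pvPref g (c :: t) || pvIn g t) := by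
  induction g with
  | nil => simp [pvIn, pvPref]
  | cons kw g ih =>
      simp only [pvIn, pvPref, List.any_cons] at *
      rw [ih]
      have h : PySem.Chars.isIn kw (c :: t)
          = (kw.isPrefixOf (c :: t) || PySem.Chars.isIn kw t) := by
        by_cases hin : PySem.Chars.isIn kw (c :: t) = true
        · rcases List.infix_cons_iff.mp ((PySem.Chars.isIn_iff_infix _ _).mp hin) with h | h
          · simp [hin, List.isPrefixOf_iff_prefix.mpr h]
          · simp [hin, (PySem.Chars.isIn_iff_infix _ _).mpr h]
        · have hni := (PySem.Chars.isIn_eq_false_iff _ _).mp (Bool.eq_false_iff.mpr hin)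
          have h1 : ¬ kw.isPrefixOf (c :: t) = true := fun hp =>
            hni (List.infix_cons_iff.mpr (Or.inl (List.isPrefixOf_iff_prefix.mp hp)))
          have h2 : ¬ PySem.Chars.isIn kw t = true := fun hp =>
            hni (List.infix_cons_iff.mpr (Or.inr ((PySem.Chars.isIn_iff_infix _ _).mp hp)))
          simp [Bool.eq_false_iff.mpr hin, Bool.eq_false_iff.mpr h1, Bool.eq_false_iff.mpr h2]
      rw [h]
      cases kw.isPrefixOf (c :: t) <;> cases PySem.Chars.isIn kw t <;> simp

lemma pvRk_nil : pvRk [] = 3 := by decide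

lemma pvRk_cons (c : Char) (t : List Char) :
    pvRk (c :: t)
      = min (if pvPref pvG0 (c :: t) then 0 else if pvPref pvG1 (c :: t) then 1
             else if pvPref pvG2 (c :: t) then 2 else 3) (pvRk t) := by
  unfold pvRk
  rw [pvIn_cons, pvIn_cons, pvIn_cons]
  cases pvPref pvG0 (c :: t) <;> cases pvPref pvG1 (c :: t) <;> cases pvPref pvG2 (c :: t) <;>
    cases hg0 : pvIn pvG0 t <;> cases hg1 : pvIn pvG1 t <;> cases hg2 : pvIn pvG2 t <;>
    simp

lemma pvScan_eq (s : List Char) : ∀ b, b ≤ 3 → pvScan s b = min b (pvRk s) := by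
  induction s with
  | nil => intro b hb; simp [pvScan, pvRk_nil]; omega
  | cons c t ih =>
      intro b hb
      rw [pvScan, pvFoldl_keywords _ _ hb, ih _ (by omega), pvRk_cons]
      omega

-- ===== VERDICT =====
theorem infer_semantic_type_py_spec : Claim_equal_infer_semantic_type_py := by
  intro col_name col_data _
  unfold Spec_infer_semantic_type_py infer_semantic_type_py infer_semantic_type_py_alt
  rw [pvScan_eq _ 3 (by omega)]
  have hA0 : (["id", "key", "number", "code"].any
      (fun pattern => PySem.Str.isIn pattern (PySem.Str.lower col_name)))
      = pvIn pvG0 (PySem.Str.lower col_name).toList := by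
    simp [pvIn, pvG0, PySem.Str.isIn_eq]
  have hA1 : (["date", "time", "created", "updated"].any
      (fun pattern => PySem.Str.isIn pattern (PySem.Str.lower col_name)))
      = pvIn pvG1 (PySem.Str.lower col_name).toList := by
    simp [pvIn, pvG1, PySem.Str.isIn_eq]
  have hA2 : (["sales", "revenue", "profit", "amount", "price", "cost", "quantity", "count"].any
      (fun pattern => PySem.Str.isIn pattern (PySem.Str.lower col_name)))
      = pvIn pvG2 (PySem.Str.lower col_name).toList := by
    simp [pvIn, pvG2, PySem.Str.isIn_eq]
  simp only [hA0, hA1, hA2, pvRk]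
  cases pvIn pvG0 (PySem.Str.lower col_name).toList <;>
    cases pvIn pvG1 (PySem.Str.lower col_name).toList <;>
    cases pvIn pvG2 (PySem.Str.lower col_name).toList <;>
    simp [pvLabels]
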